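-- pv_equiv track=rewrite | github.com/emRival/rekap_absensi | absensi_app_streamlit_v3.py | valid_jam_masuk_pulang_smpsmk
-- ===== SOURCE A (Python) =====
-- def valid_jam_masuk_pulang_smpsmk(jam_list):
--     masuk = None
--     pulang = None
--     for jam in jam_list:
--         if jam >= "07:00" and masuk is None:
--             masuk = jam
--         if jam <= "15:00":
--             pulang = jam
--     return masuk, pulang
-- ===== SOURCE B (Python) =====
-- def valid_jam_masuk_pulang_smpsmk(jam_list):
--     # Divide and conquer: first-match / last-match combine associatively,
--     # so solve halves independently and merge.
--     def solve(sub):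
--         if len(sub) == 1:
--             jam = sub[0]
--             return (jam if jam >= "07:00" else None,
--                     jam if jam <= "15:00" else None)
--         mid = len(sub) // 2
--         lm, lp = solve(sub[:mid])
--         rm, rp = solve(sub[mid:])
--         masuk = lm if lm is not None else rm
--         pulang = rp if rp is not None else lp
--         return (masuk, pulang)
--     if not jam_list:
--         return (None, None)
--     return solve(jam_list)
-- ===== Notes on version B (the rewrite author's own statement) =====
-- stated objective: alternative
-- what changed: Replaces A's single left-to-right loop carrying two accumulators with a divide-and-conquer recursion: split the list in half, solve each half, and merge results (first present masuk from the left, first present pulang from the right), correct because first-match/last-match combine associatively.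
import Mathlib
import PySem

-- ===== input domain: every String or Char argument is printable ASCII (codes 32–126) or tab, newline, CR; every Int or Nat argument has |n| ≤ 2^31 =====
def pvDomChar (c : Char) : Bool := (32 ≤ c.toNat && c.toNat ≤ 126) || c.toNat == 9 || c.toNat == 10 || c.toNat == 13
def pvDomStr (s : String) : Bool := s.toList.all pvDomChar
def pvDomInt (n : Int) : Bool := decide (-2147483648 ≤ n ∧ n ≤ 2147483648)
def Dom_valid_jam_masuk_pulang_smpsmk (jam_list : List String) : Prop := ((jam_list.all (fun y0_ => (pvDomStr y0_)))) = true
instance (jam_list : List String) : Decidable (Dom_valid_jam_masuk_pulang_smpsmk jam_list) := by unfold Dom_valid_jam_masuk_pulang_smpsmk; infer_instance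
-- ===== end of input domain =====

-- B replaces A's single left-to-right loop with two accumulators by a divide-and-conquer
-- recursion (solve halves, merge first-present masuk / last-present pulang); objective: alternative.

-- ===== PORT A =====
-- one loop, two accumulators, exactly as in the Python
def pvStepA (st : Option String × Option String) (jam : String) : Option String × Option String :=
  let masuk := if "07:00" ≤ jam ∧ st.1 = none then some jam else st.1
  let pulang := if jam ≤ "15:00" then some jam else st.2
  (masuk, pulang)

def valid_jam_masuk_pulang_smpsmk (jam_list : List String) : Option String × Option String :=
  jam_list.foldl pvStepA (none, none)

-- ===== PORT B =====
-- Source B's solve(sub): length-1 base case, split at len//2, recurse on both halves, merge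
def pvSolveB (sub : List String) : Option String × Option String :=
  if h1 : sub.length = 1 then
    let jam := sub.headI
    (if "07:00" ≤ jam then some jam else none, if jam ≤ "15:00" then some jam else none)
  else if h0 : sub.length = 0 then (none, none)  -- unreachable from the wrapper (guards the recursion)
  else
    let mid := sub.length / 2
    let l := pvSolveB (sub.take mid)
    let r := pvSolveB (sub.drop mid)
    let masuk := match l.1 with | some x => some x | none => r.1
    let pulang := match r.2 with | some x => some x | none => l.2
    (masuk, pulang)
termination_by sub.length
decreasing_by
  · simp only [List.length_take]; omega
  · simp only [List.length_drop]; omega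

def valid_jam_masuk_pulang_smpsmk_alt (jam_list : List String) : Option String × Option String :=
  if jam_list.isEmpty then (none, none) else pvSolveB jam_list

-- ===== PRECONDITION & SPEC =====
def Spec_valid_jam_masuk_pulang_smpsmk (jam_list : List String) (out : Option String × Option String) : Prop := out = valid_jam_masuk_pulang_smpsmk_alt jam_list
instance (jam_list : List String) (out : Option String × Option String) : Decidable (Spec_valid_jam_masuk_pulang_smpsmk jam_list out) := by unfold Spec_valid_jam_masuk_pulang_smpsmk; infer_instance

-- ===== CLAIM (what is proved, stated in full; the proofs are below) =====
def Claim_equal_valid_jam_masuk_pulang_smpsmk : Prop := ∀ (jam_list : List String), Dom_valid_jam_masuk_pulang_smpsmk jam_list → Spec_valid_jam_masuk_pulang_smpsmk jam_list (valid_jam_masuk_pulang_smpsmk jam_list)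

-- ===== LEMMAS AND PROOFS =====

-- closed form both sides are reduced to
def pvSpecForm (l : List String) : Option String × Option String :=
  (l.find? (fun jam => "07:00" ≤ jam), (l.filter (fun jam => jam ≤ "15:00")).getLast?)

theorem pv_getLast?_orElse (a : String) (xs : List String) :
    (xs.getLast?.orElse fun _ => some a) = (a :: xs).getLast? := by
  cases xs with
  | nil => rfl
  | cons b ys =>
    rw [List.getLast?_cons_cons]
    rcases List.getLast?_isSome.mpr (List.cons_ne_nil b ys) |> Option.isSome_iff_exists.mp with ⟨v, hv⟩
    simp [hv]

theorem pv_foldl_characterisation (l : List String) (m p : Option String) :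
    l.foldl pvStepA (m, p) =
      ((m.orElse fun _ => l.find? (fun jam => "07:00" ≤ jam)),
       (((l.filter (fun jam => jam ≤ "15:00")).getLast?).orElse fun _ => p)) := by
  induction l generalizing m p with
  | nil => cases m <;> simp [Option.orElse]
  | cons a tl ih =>
    rw [List.foldl_cons,
      show pvStepA (m, p) a =
        (if "07:00" ≤ a ∧ m = none then some a else m,
         if a ≤ "15:00" then some a else p) from rfl,
      ih, Prod.mk.injEq]
    refine ⟨?_, ?_⟩
    · cases m with
      | some x => rw [if_neg (by simp)]; rfl
      | none =>
        by_cases h : "07:00" ≤ a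
        · rw [if_pos ⟨h, rfl⟩, List.find?_cons_of_pos (p := fun jam => decide ("07:00" ≤ jam)) (decide_eq_true h)]; rfl
        · rw [if_neg (fun hc => h hc.1), List.find?_cons_of_neg (p := fun jam => decide ("07:00" ≤ jam)) (by simp [h])]
    · by_cases h : a ≤ "15:00"
      · rw [if_pos h, List.filter_cons_of_pos (p := fun jam => decide (jam ≤ "15:00")) (decide_eq_true h), ← pv_getLast?_orElse a]
        cases (tl.filter (fun jam => jam ≤ "15:00")).getLast? <;> rfl
      · rw [if_neg h, List.filter_cons_of_neg (p := fun jam => decide (jam ≤ "15:00")) (by simp [h])]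

theorem pv_specForm_append (a b : List String) :
    pvSpecForm (a ++ b) =
      ((match (pvSpecForm a).1 with | some x => some x | none => (pvSpecForm b).1),
       (match (pvSpecForm b).2 with | some x => some x | none => (pvSpecForm a).2)) := by
  unfold pvSpecForm
  rw [Prod.mk.injEq]
  constructor
  · rw [List.find?_append]
    cases a.find? (fun jam => decide ("07:00" ≤ jam)) <;> rfl
  · rw [List.filter_append, List.getLast?_append]
    cases (b.filter (fun jam => decide (jam ≤ "15:00"))).getLast? <;> rfl

theorem pv_specForm_singleton (jam : String) :
    pvSpecForm [jam] =
      (if "07:00" ≤ jam then some jam else none, if jam ≤ "15:00" then some jam else none) := by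
  unfold pvSpecForm
  rw [Prod.mk.injEq]
  constructor
  · by_cases hm : "07:00" ≤ jam
    · rw [List.find?_cons_of_pos (p := fun j => decide ("07:00" ≤ j)) (decide_eq_true hm), if_pos hm]
    · rw [List.find?_cons_of_neg (p := fun j => decide ("07:00" ≤ j)) (by simp [hm]), if_neg hm]
      rfl
  · by_cases hp : jam ≤ "15:00"
    · rw [List.filter_cons_of_pos (p := fun j => decide (j ≤ "15:00")) (decide_eq_true hp), if_pos hp]
      rfl
    · rw [List.filter_cons_of_neg (p := fun j => decide (j ≤ "15:00")) (by simp [hp]), if_neg hp]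
      rfl

theorem pv_solveB_char_aux (n : Nat) : ∀ (l : List String), l.length ≤ n → pvSolveB l = pvSpecForm l := by
  induction n with
  | zero =>
    intro l hl
    obtain rfl : l = [] := List.eq_nil_of_length_eq_zero (Nat.le_zero.mp hl)
    rw [pvSolveB]; rfl
  | succ n ih =>
    intro l hl
    rw [pvSolveB]
    by_cases h1 : l.length = 1
    · obtain ⟨jam, rfl⟩ : ∃ jam, l = [jam] := by
        match l, h1 with | [j], _ => exact ⟨j, rfl⟩
      rw [dif_pos h1, pv_specForm_singleton]; rfl
    · rw [dif_neg h1]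
      by_cases h0 : l.length = 0
      · obtain rfl : l = [] := List.eq_nil_of_length_eq_zero h0
        rw [dif_pos h0]; rfl
      · rw [dif_neg h0]
        have ht : (l.take (l.length / 2)).length ≤ n := by
          simp only [List.length_take]; omega
        have hd : (l.drop (l.length / 2)).length ≤ n := by
          simp only [List.length_drop]; omega
        simp only [ih _ ht, ih _ hd]
        rw [← pv_specForm_append (l.take (l.length / 2)) (l.drop (l.length / 2)),
          List.take_append_drop]

theorem pv_solveB_characterisation (l : List String) : pvSolveB l = pvSpecForm l :=
  pv_solveB_char_aux l.length l (Nat.le_refl _)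

-- ===== VERDICT (by name: the statement is the Claim_ definition above) =====
theorem valid_jam_masuk_pulang_smpsmk_spec : Claim_equal_valid_jam_masuk_pulang_smpsmk := by
  intro jam_list _
  show _ = _
  rw [valid_jam_masuk_pulang_smpsmk, pv_foldl_characterisation, valid_jam_masuk_pulang_smpsmk_alt]
  cases jam_list with
  | nil => rfl
  | cons a tl =>
    rw [if_neg (by simp), pv_solveB_characterisation, pvSpecForm, Prod.mk.injEq]
    refine ⟨rfl, ?_⟩
    cases ((a :: tl).filter (fun jam => jam ≤ "15:00")).getLast? <;> rfl
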